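-- pv_equiv track=rewrite | github.com/taylorbrook/MAX-MSP_CC_Framework | src/maxpat/audit/parser.py | parse_object_text
-- ===== SOURCE A (Python) =====
-- def parse_object_text(text: str) -> tuple[str, list[str], dict[str, str]]:
--     """Parse newobj text into object name, positional args, and attributes.
--
--     Splits on the first ``@`` to separate positional arguments from attribute
--     key/value pairs. Handles empty text gracefully.
--
--     Args:
--         text: The full text of a newobj box (e.g., ``"cycle~ 440"``).
--
--     Returns:
--         Tuple of (name, positional_args, attributes).
--
--     Examples:
--         >>> parse_object_text("cycle~ 440")
--         ('cycle~', ['440'], {})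
--         >>> parse_object_text("line~ @activeout 1")
--         ('line~', [], {'activeout': '1'})
--         >>> parse_object_text("t b i f")
--         ('t', ['b', 'i', 'f'], {})
--         >>> parse_object_text("")
--         ('', [], {})
--     """
--     parts = text.split()
--     if not parts:
--         return ("", [], {})
--
--     name = parts[0]
--     positional: list[str] = []
--     attributes: dict[str, str] = {}
--
--     i = 1
--     while i < len(parts):
--         if parts[i].startswith("@"):
--             attr_key = parts[i][1:]  # Remove leading @
--             if i + 1 < len(parts) and not parts[i + 1].startswith("@"):
--                 attributes[attr_key] = parts[i + 1]
--                 i += 2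
--             else:
--                 attributes[attr_key] = ""
--                 i += 1
--         else:
--             positional.append(parts[i])
--             i += 1
--
--     return (name, positional, attributes)
-- ===== SOURCE B (Python) =====
-- def parse_object_text(text: str) -> tuple[str, list[str], dict[str, str]]:
--     parts = text.split()
--     if not parts:
--         return ("", [], {})
--     positional: list[str] = []
--     attributes: dict[str, str] = {}
--     pending_key = None
--     for tok in parts[1:]:
--         if tok.startswith("@"):
--             if pending_key is not None:
--                 attributes[pending_key] = ""
--             pending_key = tok[1:]
--         elif pending_key is not None:
--             attributes[pending_key] = tok
--             pending_key = None
--         else: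
--             positional.append(tok)
--     if pending_key is not None:
--         attributes[pending_key] = ""
--     return (parts[0], positional, attributes)
-- ===== Notes on version B (the rewrite author's own statement) =====
-- stated objective: simpler
-- what changed: Replaced the index+lookahead while loop (stepping by 1 or 2) with a single forward for-loop state machine that carries a pending attribute key and flushes it when another attribute token arrives or the tokens end.
import Mathlib
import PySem

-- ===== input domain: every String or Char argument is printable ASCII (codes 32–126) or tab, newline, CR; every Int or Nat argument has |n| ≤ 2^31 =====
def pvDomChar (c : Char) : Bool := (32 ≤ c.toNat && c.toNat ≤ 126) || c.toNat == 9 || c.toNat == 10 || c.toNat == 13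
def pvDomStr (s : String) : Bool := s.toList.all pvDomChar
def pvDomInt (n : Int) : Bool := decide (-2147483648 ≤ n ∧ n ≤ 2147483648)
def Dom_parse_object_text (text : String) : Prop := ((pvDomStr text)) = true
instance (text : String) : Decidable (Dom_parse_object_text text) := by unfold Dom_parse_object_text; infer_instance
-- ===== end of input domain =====

-- B replaces A's index+lookahead while loop by a single-pass state machine with a pending key; return value only, no mutation.

-- ===== PORT A =====
-- A's while loop over index i, advancing by 1 or 2 depending on the lookahead parts[i+1].
def parseLoopA (parts : List String) (positional : List String)
    (attributes : PySem.Dict String String) (i : Nat) :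
    List String × PySem.Dict String String :=
  if h : i < parts.length then
    let t := parts[i]
    if PySem.Str.startswith t "@" then
      let attr_key := PySem.Str.slice t (some 1) none
      if h2 : i + 1 < parts.length then
        if ¬ PySem.Str.startswith parts[i+1] "@" then
          parseLoopA parts positional (attributes.insert attr_key parts[i+1]) (i + 2)
        else
          parseLoopA parts positional (attributes.insert attr_key "") (i + 1)
      else
        parseLoopA parts positional (attributes.insert attr_key "") (i + 1)
    else
      parseLoopA parts (positional ++ [t]) attributes (i + 1)
  else
    (positional, attributes)
termination_by parts.length - i

def parse_object_text (text : String) : String × List String × (List (String × String)) :=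
  let parts := PySem.Str.split₀ text
  match parts with
  | [] => ("", [], [])
  | name :: _ =>
    let r := parseLoopA parts [] PySem.Dict.empty 1
    (name, r.1, r.2.items)

-- ===== PORT B =====
-- B's for loop over the remaining tokens, carrying an Option pending key; flushed on '@' and at the end.
def parseLoopB (positional : List String) (attributes : PySem.Dict String String)
    (pending : Option String) : List String → List String × PySem.Dict String String
  | [] =>
    match pending with
    | some k => (positional, attributes.insert k "")
    | none => (positional, attributes)
  | tok :: rest =>
    if PySem.Str.startswith tok "@" then
      let attrs :=
        match pending with
        | some k => attributes.insert k ""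
        | none => attributes
      parseLoopB positional attrs (some (PySem.Str.slice tok (some 1) none)) rest
    else
      match pending with
      | some k => parseLoopB positional (attributes.insert k tok) none rest
      | none => parseLoopB (positional ++ [tok]) attributes none rest

def parse_object_text_alt (text : String) : String × List String × (List (String × String)) :=
  match PySem.Str.split₀ text with
  | [] => ("", [], [])
  | name :: rest =>
    let r := parseLoopB [] PySem.Dict.empty none rest
    (name, r.1, r.2.items)

-- ===== PRECONDITION & SPEC =====
def Spec_parse_object_text (text : String) (out : String × List String × (List (String × String))) : Prop := out = parse_object_text_alt text
instance (text : String) (out : String × List String × (List (String × String))) : Decidable (Spec_parse_object_text text out) := by unfold Spec_parse_object_text; infer_instance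

-- ===== CLAIM (what is proved, stated in full; the proofs are below) =====
def Claim_equal_parse_object_text : Prop := ∀ (text : String), Dom_parse_object_text text → Spec_parse_object_text text (parse_object_text text)

-- ===== LEMMAS AND PROOFS =====

-- Flushing a pending key commutes with the B loop when the next token (if any) starts with '@'.
theorem parseLoopB_flush (l : List String) (k : String) (pos : List String)
    (attrs : PySem.Dict String String)
    (h : l = [] ∨ ∃ t rest, l = t :: rest ∧ PySem.Str.startswith t "@" = true) :
    parseLoopB pos attrs (some k) l = parseLoopB pos (attrs.insert k "") none l := by
  rcases h with h | ⟨t, rest, rfl, ht⟩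
  · subst h; simp [parseLoopB]
  · have ht' : PySem.Chars.startswith t.toList ['@'] = true := by simpa using ht
    simp [parseLoopB, ht']

theorem parseLoopA_eq_loopB (parts : List String) (i : Nat) (pos : List String)
    (attrs : PySem.Dict String String) :
    parseLoopA parts pos attrs i = parseLoopB pos attrs none (parts.drop i) := by
  by_cases h : i < parts.length
  · have hdrop : parts.drop i = parts[i] :: parts.drop (i + 1) :=
      (List.getElem_cons_drop h).symm
    by_cases hat : PySem.Str.startswith parts[i] "@" = true

    · by_cases h2 : i + 1 < parts.length
      · have hdrop2 : parts.drop (i + 1) = parts[i+1] :: parts.drop (i + 2) :=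
          (List.getElem_cons_drop h2).symm
        by_cases hat2 : PySem.Str.startswith parts[i+1] "@" = true
        · -- next token is also an attribute: A inserts "" and steps by 1; B flushes on it
          rw [parseLoopA]
          simp only [h, dif_pos, hat, if_pos, h2, hat2, not_true_eq_false, if_false]
          rw [parseLoopA_eq_loopB parts (i + 1), hdrop, parseLoopB]
          simp only [hat, if_pos]
          rw [parseLoopB_flush _ _ _ _ (Or.inr ⟨_, _, hdrop2, hat2⟩)]
        · -- next token is a value: A consumes both; B records pending then assigns
          rw [parseLoopA]
          simp only [h, dif_pos, hat, if_pos, h2, dif_pos, hat2]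
          rw [parseLoopA_eq_loopB parts (i + 2), hdrop, hdrop2, parseLoopB]
          simp only [hat, if_pos]
          rw [parseLoopB]
          have hat2' : PySem.Chars.startswith parts[i+1].toList ['@'] = false := by
            simpa using hat2
          simp [hat2']
      · -- '@' token is last: both insert "" (A directly, B via the final flush)
        have hnil : parts.drop (i + 1) = [] := List.drop_eq_nil_of_le (by omega)
        rw [parseLoopA]
        simp only [h, dif_pos, hat, if_pos, h2, dif_neg, not_false_iff]
        rw [parseLoopA_eq_loopB parts (i + 1), hdrop, parseLoopB]
        simp only [hat, if_pos]
        rw [parseLoopB_flush _ _ _ _ (Or.inl hnil)]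
    · -- plain positional token
      rw [parseLoopA]
      simp only [h, dif_pos, hat, if_neg, Bool.not_eq_true]
      rw [parseLoopA_eq_loopB parts (i + 1), hdrop, parseLoopB]
      have hatf : PySem.Chars.startswith parts[i].toList ['@'] = false := by simpa using hat
      simp [hatf]
  · have hnil : parts.drop i = [] := List.drop_eq_nil_of_le (by omega)
    rw [parseLoopA, hnil]
    simp [h, parseLoopB]
termination_by parts.length - i
decreasing_by all_goals omega

-- ===== VERDICT (by name: the statement is the Claim_ definition above) =====
theorem parse_object_text_spec : Claim_equal_parse_object_text := by
  intro text _
  unfold Spec_parse_object_text parse_object_text parse_object_text_alt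
  cases hp : PySem.Str.split₀ text with
  | nil => rfl
  | cons name rest =>
    simp only
    rw [parseLoopA_eq_loopB]
    rfl
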